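-- pv_equiv track=rewrite | github.com/729149195/DataDiagnosticPlatform | backend/api/utils.py | filter_range
-- ===== SOURCE A (Python) =====
-- def filter_range(X_values, Y_values, time_begin, time_end, upper_bound, lower_bound):
--     segments = []  # 用于保存符合条件的非连续段
--     current_segment = {'X': [], 'Y': []}  # 当前的连续段
--
--     for x, y in zip(X_values, Y_values):
--         # 检查该点是否在时间和强度范围内
--         if time_begin <= x <= time_end and lower_bound <= y <= upper_bound:
--             # 如果在范围内，则添加到当前连续段
--             current_segment['X'].append(x)
--             current_segment['Y'].append(y)
--         else:
--             if current_segment['X']: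
--                 segments.append(current_segment)
--                 current_segment = {'X': [], 'Y': []}  # 开始新的段
--
--     if current_segment['X']:
--         segments.append(current_segment)
--
--     return segments
-- ===== SOURCE B (Python) =====
-- def filter_range(X_values, Y_values, time_begin, time_end, upper_bound, lower_bound):
--     # Two-pointer run scanner: find each maximal in-range run [i, j) directly,
--     # slice it out and unzip it, instead of accumulating/flushing a current segment.
--     pts = list(zip(X_values, Y_values))
--     ok = lambda p: time_begin <= p[0] <= time_end and lower_bound <= p[1] <= upper_bound
--     segments = []
--     n = len(pts)
--     i = 0
--     while i < n:
--         if ok(pts[i]):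
--             j = i
--             while j < n and ok(pts[j]):
--                 j += 1
--             run = pts[i:j]
--             segments.append({'X': [p[0] for p in run], 'Y': [p[1] for p in run]})
--             i = j
--         else:
--             i += 1
--     return segments
-- ===== Notes on version B (the rewrite author's own statement) =====
-- stated objective: alternative
-- what changed: Replaces A's accumulate-and-flush current-segment state machine with a two-pointer scanner that locates each maximal in-range run directly and unzips the slice into the segment dict.
import Mathlib
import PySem

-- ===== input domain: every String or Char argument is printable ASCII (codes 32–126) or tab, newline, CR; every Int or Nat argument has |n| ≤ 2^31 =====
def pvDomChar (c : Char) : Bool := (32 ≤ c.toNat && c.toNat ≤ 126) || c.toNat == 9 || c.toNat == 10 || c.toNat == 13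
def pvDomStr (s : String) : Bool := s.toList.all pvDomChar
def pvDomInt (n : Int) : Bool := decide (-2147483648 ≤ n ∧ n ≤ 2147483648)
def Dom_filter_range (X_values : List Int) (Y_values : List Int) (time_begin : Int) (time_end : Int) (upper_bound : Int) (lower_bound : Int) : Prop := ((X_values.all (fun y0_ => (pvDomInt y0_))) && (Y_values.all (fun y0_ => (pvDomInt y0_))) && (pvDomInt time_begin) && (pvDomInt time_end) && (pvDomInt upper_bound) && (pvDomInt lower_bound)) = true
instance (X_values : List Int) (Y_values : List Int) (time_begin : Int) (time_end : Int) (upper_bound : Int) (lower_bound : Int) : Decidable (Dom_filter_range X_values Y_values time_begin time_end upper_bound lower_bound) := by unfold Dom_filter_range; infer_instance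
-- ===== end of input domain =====

-- B replaces the accumulate-and-flush segment state machine with a two-pointer maximal-run scanner (alternative decomposition, same cost).


-- ===== PORT A =====
def filter_range (X_values : List Int) (Y_values : List Int) (time_begin : Int) (time_end : Int) (upper_bound : Int) (lower_bound : Int) : List (List (String × List Int)) :=
  -- segments / current_segment state machine: fold over zip, flush on out-of-range point
  let step : (List (List (String × List Int)) × List Int × List Int) → (Int × Int) → (List (List (String × List Int)) × List Int × List Int) :=
    fun st p =>
      let segs := st.1; let cx := st.2.1; let cy := st.2.2
      if time_begin ≤ p.1 ∧ p.1 ≤ time_end ∧ lower_bound ≤ p.2 ∧ p.2 ≤ upper_bound then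
        (segs, cx ++ [p.1], cy ++ [p.2])
      else
        if cx = [] then (segs, cx, cy)
        else (segs ++ [[("X", cx), ("Y", cy)]], [], [])
  let r := (X_values.zip Y_values).foldl step ([], [], [])
  if r.2.1 = [] then r.1 else r.1 ++ [[("X", r.2.1), ("Y", r.2.2)]]

-- ===== PORT B =====
-- B-side: unzip a maximal run into the segment's association list
def pvMkSeg (run : List (Int × Int)) : List (String × List Int) :=
  [("X", run.map Prod.fst), ("Y", run.map Prod.snd)]

-- B-side: two-pointer scan — take each maximal true-run whole, skip false points
def pvRuns (pred : Int × Int → Bool) : List (Int × Int) → List (List (Int × Int))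
  | [] => []
  | p :: rest =>
    if pred p then
      (p :: rest.takeWhile pred) :: pvRuns pred (rest.dropWhile pred)
    else
      pvRuns pred rest
termination_by l => l.length
decreasing_by
  · simpa [Nat.lt_succ_iff] using List.length_dropWhile_le pred rest
  · simp

def filter_range_alt (X_values : List Int) (Y_values : List Int) (time_begin : Int) (time_end : Int) (upper_bound : Int) (lower_bound : Int) : List (List (String × List Int)) :=
  let pred : Int × Int → Bool := fun p =>
    decide (time_begin ≤ p.1 ∧ p.1 ≤ time_end ∧ lower_bound ≤ p.2 ∧ p.2 ≤ upper_bound)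
  (pvRuns pred (X_values.zip Y_values)).map pvMkSeg

-- ===== PRECONDITION & SPEC =====
def Spec_filter_range (X_values : List Int) (Y_values : List Int) (time_begin : Int) (time_end : Int) (upper_bound : Int) (lower_bound : Int) (out : List (List (String × List Int))) : Prop := out = filter_range_alt X_values Y_values time_begin time_end upper_bound lower_bound
instance (X_values : List Int) (Y_values : List Int) (time_begin : Int) (time_end : Int) (upper_bound : Int) (lower_bound : Int) (out : List (List (String × List Int))) : Decidable (Spec_filter_range X_values Y_values time_begin time_end upper_bound lower_bound out) := by unfold Spec_filter_range; infer_instance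

-- ===== CLAIM (what is proved, stated in full; the proofs are below) =====
def Claim_equal_filter_range : Prop := ∀ (X_values : List Int) (Y_values : List Int) (time_begin : Int) (time_end : Int) (upper_bound : Int) (lower_bound : Int), Dom_filter_range X_values Y_values time_begin time_end upper_bound lower_bound → Spec_filter_range X_values Y_values time_begin time_end upper_bound lower_bound (filter_range X_values Y_values time_begin time_end upper_bound lower_bound)

-- ===== LEMMAS AND PROOFS =====
-- Proof-side copies of A's loop body / flush and B's predicate, cited by the lemmas.
def pvPred (tb te ub lb : Int) (p : Int × Int) : Bool :=
  decide (tb ≤ p.1 ∧ p.1 ≤ te ∧ lb ≤ p.2 ∧ p.2 ≤ ub)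

def pvStep (tb te ub lb : Int)
    (st : List (List (String × List Int)) × List Int × List Int) (p : Int × Int) :
    List (List (String × List Int)) × List Int × List Int :=
  let segs := st.1; let cx := st.2.1; let cy := st.2.2
  if tb ≤ p.1 ∧ p.1 ≤ te ∧ lb ≤ p.2 ∧ p.2 ≤ ub then
    (segs, cx ++ [p.1], cy ++ [p.2])
  else
    if cx = [] then (segs, cx, cy)
    else (segs ++ [[("X", cx), ("Y", cy)]], [], [])

def pvFlush (st : List (List (String × List Int)) × List Int × List Int) :
    List (List (String × List Int)) :=
  if st.2.1 = [] then st.1 else st.1 ++ [[("X", st.2.1), ("Y", st.2.2)]]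

theorem filter_range_eq (X Y : List Int) (tb te ub lb : Int) :
    filter_range X Y tb te ub lb
      = pvFlush ((X.zip Y).foldl (pvStep tb te ub lb) ([], [], [])) := rfl

theorem filter_range_alt_eq (X Y : List Int) (tb te ub lb : Int) :
    filter_range_alt X Y tb te ub lb
      = (pvRuns (pvPred tb te ub lb) (X.zip Y)).map pvMkSeg := rfl

theorem pvStep_true (tb te ub lb : Int) (segs : List (List (String × List Int)))
    (cx cy : List Int) (p : Int × Int) (h : pvPred tb te ub lb p = true) :
    pvStep tb te ub lb (segs, cx, cy) p = (segs, cx ++ [p.1], cy ++ [p.2]) := by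
  simp only [pvPred, decide_eq_true_eq] at h
  simp [pvStep, h]

theorem pvStep_false (tb te ub lb : Int) (segs : List (List (String × List Int)))
    (cx cy : List Int) (p : Int × Int) (h : ¬ pvPred tb te ub lb p = true) :
    pvStep tb te ub lb (segs, cx, cy) p
      = if cx = [] then (segs, cx, cy) else (segs ++ [[("X", cx), ("Y", cy)]], [], []) := by
  simp only [pvPred, decide_eq_true_eq] at h
  simp [pvStep, h]

theorem pvFlush_append (s : List (List (String × List Int)))
    (t : List (List (String × List Int)) × List Int × List Int) :
    pvFlush (s ++ t.1, t.2) = s ++ pvFlush t := by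
  simp only [pvFlush]
  split <;> simp

-- the segments component only grows by appending: factor the initial segments out
theorem pvSegs_factor (tb te ub lb : Int) (ps : List (Int × Int)) :
    ∀ (segs : List (List (String × List Int))) (cx cy : List Int),
    ps.foldl (pvStep tb te ub lb) (segs, cx, cy)
      = (segs ++ (ps.foldl (pvStep tb te ub lb) ([], cx, cy)).1,
         (ps.foldl (pvStep tb te ub lb) ([], cx, cy)).2) := by
  induction ps with
  | nil => intro segs cx cy; simp
  | cons p ps ih =>
    intro segs cx cy
    by_cases hp : pvPred tb te ub lb p = true
    · simp only [List.foldl_cons, pvStep_true _ _ _ _ _ _ _ _ hp]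
      exact ih segs _ _
    · simp only [List.foldl_cons, pvStep_false _ _ _ _ _ _ _ _ hp]
      by_cases hcx : cx = []
      · simp only [hcx, if_true]
        exact ih segs _ _
      · simp only [if_neg hcx]
        rw [ih (segs ++ [[("X", cx), ("Y", cy)]]) [] [], ih ([] ++ [[("X", cx), ("Y", cy)]]) [] []]
        simp

-- the main invariant: a partial current run versus B's whole-run scanner
theorem pvMain (tb te ub lb : Int) (ps : List (Int × Int)) :
    (pvFlush (ps.foldl (pvStep tb te ub lb) ([], [], []))
        = (pvRuns (pvPred tb te ub lb) ps).map pvMkSeg)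
    ∧ ∀ run : List (Int × Int), run ≠ [] →
        pvFlush (ps.foldl (pvStep tb te ub lb) ([], run.map Prod.fst, run.map Prod.snd))
          = pvMkSeg (run ++ ps.takeWhile (pvPred tb te ub lb))
              :: (pvRuns (pvPred tb te ub lb) (ps.dropWhile (pvPred tb te ub lb))).map pvMkSeg := by
  induction ps with
  | nil =>
    constructor
    · simp [pvFlush, pvRuns]
    · intro run hrun
      simp [pvFlush, pvRuns, pvMkSeg, hrun]
  | cons p ps ih =>
    by_cases hp : pvPred tb te ub lb p = true
    · constructor
      · simp only [List.foldl_cons, pvStep_true _ _ _ _ _ _ _ _ hp]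
        have h2 := ih.2 [p] (by simp)
        simp only [List.map_cons, List.map_nil] at h2
        rw [show ([p.1] : List Int) = [] ++ [p.1] by simp,
            show ([p.2] : List Int) = [] ++ [p.2] by simp] at h2
        simpa [pvRuns, hp] using h2
      · intro run hrun
        simp only [List.foldl_cons, pvStep_true _ _ _ _ _ _ _ _ hp]
        have h2 := ih.2 (run ++ [p]) (by simp)
        simp only [List.map_append, List.map_cons, List.map_nil] at h2
        rw [h2]
        simp [hp, List.append_assoc]
    · constructor
      · simp only [List.foldl_cons, pvStep_false _ _ _ _ _ _ _ _ hp]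
        simpa [pvRuns, hp] using ih.1
      · intro run hrun
        have hcx : run.map Prod.fst ≠ [] := by simpa using hrun
        simp only [List.foldl_cons, pvStep_false _ _ _ _ _ _ _ _ hp, if_neg hcx]
        rw [show ([[("X", run.map Prod.fst), ("Y", run.map Prod.snd)]] :
              List (List (String × List Int))) = [] ++ [pvMkSeg run] by simp [pvMkSeg],
            pvSegs_factor, pvFlush_append]
        simp only [List.nil_append]
        rw [ih.1]
        simp [hp, pvRuns]

-- ===== VERDICT (by name: the statement is the Claim_ definition above) =====
theorem filter_range_spec : Claim_equal_filter_range := by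
  intro X Y tb te ub lb _
  unfold Spec_filter_range
  rw [filter_range_eq, filter_range_alt_eq]
  exact (pvMain tb te ub lb (X.zip Y)).1
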